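-- pv_equiv track=rewrite | github.com/RhushabhVaghela/nexus | src/capability_registry.py | get_training_order
-- ===== SOURCE A (Python) =====
-- from typing import Dict, List, Set, Tuple, Optional
--
-- def get_training_order(enabled_capabilities: List[str]) -> List[str]:
--     """
--     Get optimal training order for capabilities.
--
--     Omni should always be first if enabled, followed by
--     capabilities in order of complexity.
--     """
--     order = []
--
--     # Omni first (if enabled)
--     if "omni" in enabled_capabilities:
--         order.append("omni")
--
--     # Text-only capabilities
--     text_only = ["streaming", "cot", "thinking", "reasoning", "tool-calling"]
--     for cap in text_only:
--         if cap in enabled_capabilities: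
--             order.append(cap)
--
--     # Vision capabilities
--     if "vision-qa" in enabled_capabilities:
--         order.append("vision-qa")
--     if "video-understanding" in enabled_capabilities:
--         order.append("video-understanding")
--
--     # Audio capabilities
--     if "podcast" in enabled_capabilities:
--         order.append("podcast")
--
--     # Full omni capabilities
--     if "tri-streaming" in enabled_capabilities:
--         order.append("tri-streaming")
--
--     return order
-- ===== SOURCE B (Python) =====
-- PRIORITY = {
--     "omni": 0, "streaming": 1, "cot": 2, "thinking": 3, "reasoning": 4,
--     "tool-calling": 5, "vision-qa": 6, "video-understanding": 7,
--     "podcast": 8, "tri-streaming": 9,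
-- }
--
-- def get_training_order(enabled_capabilities):
--     present = set(c for c in enabled_capabilities if c in PRIORITY)
--     return sorted(present, key=PRIORITY.get)
-- ===== Notes on version B (the rewrite author's own statement) =====
-- stated objective: idiomatic
-- what changed: Replaces A's hardcoded scan with interleaved if-branches by a priority-index dict: dedup the enabled capabilities into a set, keep those that are keys of the dict, and sort them by their priority rank.
import Mathlib
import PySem

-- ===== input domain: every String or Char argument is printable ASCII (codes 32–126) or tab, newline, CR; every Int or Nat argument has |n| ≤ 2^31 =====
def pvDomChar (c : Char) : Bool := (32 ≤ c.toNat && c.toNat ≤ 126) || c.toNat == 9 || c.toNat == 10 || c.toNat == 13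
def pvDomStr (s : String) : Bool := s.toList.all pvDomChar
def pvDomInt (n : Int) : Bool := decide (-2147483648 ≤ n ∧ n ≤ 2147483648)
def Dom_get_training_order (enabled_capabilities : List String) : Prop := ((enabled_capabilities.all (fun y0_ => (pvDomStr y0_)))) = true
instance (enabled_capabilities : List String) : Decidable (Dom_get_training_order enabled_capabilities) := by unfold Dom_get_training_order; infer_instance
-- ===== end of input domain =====

-- B builds a priority-index table once, dedups the enabled capabilities into a set and sorts the
-- known ones by their priority index, instead of A's hardcoded scan with interleaved if-branches (idiomatic).

-- ===== PORT A =====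
def get_training_order (enabled_capabilities : List String) : List String :=
  let order : List String := []
  let order := if enabled_capabilities.contains "omni" then order ++ ["omni"] else order
  let text_only : List String := ["streaming", "cot", "thinking", "reasoning", "tool-calling"]
  let order := text_only.foldl
    (fun order cap => if enabled_capabilities.contains cap then order ++ [cap] else order) order
  let order := if enabled_capabilities.contains "vision-qa" then order ++ ["vision-qa"] else order
  let order := if enabled_capabilities.contains "video-understanding" then order ++ ["video-understanding"] else order
  let order := if enabled_capabilities.contains "podcast" then order ++ ["podcast"] else order
  let order := if enabled_capabilities.contains "tri-streaming" then order ++ ["tri-streaming"] else order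
  order

-- ===== PORT B =====
def pvPriority : PySem.Dict String Int :=
  PySem.Dict.ofList [("omni", 0), ("streaming", 1), ("cot", 2), ("thinking", 3),
    ("reasoning", 4), ("tool-calling", 5), ("vision-qa", 6), ("video-understanding", 7),
    ("podcast", 8), ("tri-streaming", 9)]

-- sorted(present, key=PRIORITY.get): every member of `present` is a key of pvPriority, so
-- PRIORITY.get always returns its Int rank there; ported as getD with an unreachable default.
-- The sort key is injective on `present` (distinct keys, distinct ranks), so the result does
-- not depend on the set's iteration order.
def get_training_order_alt (enabled_capabilities : List String) : List String :=
  let present : PySem.Set String :=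
    PySem.Set.ofList (enabled_capabilities.filter (fun c => pvPriority.contains c))
  PySem.List.sorted present (fun c => pvPriority.getD c 0) false

-- ===== PRECONDITION & SPEC =====
def Spec_get_training_order (enabled_capabilities : List String) (out : List String) : Prop := out = get_training_order_alt enabled_capabilities
instance (enabled_capabilities : List String) (out : List String) : Decidable (Spec_get_training_order enabled_capabilities out) := by unfold Spec_get_training_order; infer_instance

-- ===== CLAIM (what is proved, stated in full; the proofs are below) =====
def Claim_equal_get_training_order : Prop := ∀ (enabled_capabilities : List String), Dom_get_training_order enabled_capabilities → Spec_get_training_order enabled_capabilities (get_training_order enabled_capabilities)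

-- ===== LEMMAS AND PROOFS =====

-- the fixed priority order A hardcodes; both sides are shown equal to filtering it by membership
def pvPrioList : List String :=
  ["omni", "streaming", "cot", "thinking", "reasoning", "tool-calling",
   "vision-qa", "video-understanding", "podcast", "tri-streaming"]

theorem pvA_eq_filter (caps : List String) :
    get_training_order caps = pvPrioList.filter (fun c => caps.contains c) := by
  have hif : ∀ (l : List String) (x : String),
      (if caps.contains x = true then l ++ [x] else l)
        = l ++ (if caps.contains x = true then [x] else []) := by
    intro l x; split <;> simp
  have hsplit : pvPrioList = ["omni"] ++ ["streaming", "cot", "thinking", "reasoning", "tool-calling"]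
      ++ ["vision-qa"] ++ ["video-understanding"] ++ ["podcast"] ++ ["tri-streaming"] := rfl
  simp only [get_training_order]
  rw [PySem.List.foldl_append_if (fun c => caps.contains c) (fun c => c)]
  simp only [hif]
  simp only [hsplit, List.filter_append, List.filter_singleton, List.map_id', List.nil_append,
    List.append_assoc, Bool.cond_eq_ite]

theorem pvPriority_contains (x : String) :
    pvPriority.contains x = true ↔ x ∈ pvPrioList := by
  have h : pvPriority.items = pvPrioList.zip [0,1,2,3,4,5,6,7,8,9] := rfl
  simp only [PySem.Dict.contains, h, pvPrioList, List.zip, List.zipWith, List.any_cons,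
    List.any_nil, Bool.or_eq_true, beq_iff_eq, List.mem_cons, List.not_mem_nil, or_false]
  tauto

theorem pvB_eq_filter (caps : List String) :
    get_training_order_alt caps = pvPrioList.filter (fun c => caps.contains c) := by
  unfold get_training_order_alt
  apply PySem.List.sorted_eq_of_perm_of_pairwise_lt
  · refine (List.perm_ext_iff_of_nodup ?_ ?_).mpr ?_
    · exact List.Nodup.filter _ (by decide)
    · exact PySem.Set.nodup_ofList _
    · intro x
      simp only [List.mem_filter, PySem.Set.mem_ofList, pvPriority_contains,
        List.contains_eq_mem, decide_eq_true_eq]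
      tauto
  · exact List.Pairwise.filter _ (by decide)

-- ===== VERDICT (by name: the statement is the Claim_ definition above) =====
theorem get_training_order_spec : Claim_equal_get_training_order := by
  intro caps _
  unfold Spec_get_training_order
  rw [pvA_eq_filter, pvB_eq_filter]
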